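-- pv_equiv track=rewrite | github.com/WatermeloneXT/IO-Benchmark | commands/analyze_model_wrong_keywords.py | keyword_order_from_rows
-- ===== SOURCE A (Python) =====
-- from typing import Any, Dict, Iterable, List, Optional, Sequence, Set, Tuple
--
-- def keyword_order_from_rows(top_rows_by_model: Dict[str, List[Dict[str, Any]]]) -> List[str]:
--     keywords: List[str] = []
--     for rows in top_rows_by_model.values():
--         for row in rows:
--             keyword = str(row.get("keyword", "") or "")
--             if keyword and keyword not in keywords:
--                 keywords.append(keyword)
--     return keywords
-- ===== SOURCE B (Python) =====
-- def keyword_order_from_rows(top_rows_by_model):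
--     # Pass 1: flatten every keyword, then drop the falsy ones.
--     flat = [str(row.get("keyword", "") or "")
--             for rows in top_rows_by_model.values() for row in rows]
--     flat = [kw for kw in flat if kw]
--     # Pass 2: sieve dedup — emit the head, delete all its later copies, repeat.
--     out = []
--     while flat:
--         head = flat[0]
--         out.append(head)
--         flat = [k for k in flat[1:] if k != head]
--     return out
-- ===== Notes on version B (the rewrite author's own statement) =====
-- stated objective: alternative
-- what changed: Replaces A's scan-while-building dedup (membership test against the growing output inside the nested row loop) by a flatten pass followed by a sieve: repeatedly emit the first remaining keyword and filter all its later duplicates out of the worklist, so no membership test against the output ever occurs.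
import Mathlib
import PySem

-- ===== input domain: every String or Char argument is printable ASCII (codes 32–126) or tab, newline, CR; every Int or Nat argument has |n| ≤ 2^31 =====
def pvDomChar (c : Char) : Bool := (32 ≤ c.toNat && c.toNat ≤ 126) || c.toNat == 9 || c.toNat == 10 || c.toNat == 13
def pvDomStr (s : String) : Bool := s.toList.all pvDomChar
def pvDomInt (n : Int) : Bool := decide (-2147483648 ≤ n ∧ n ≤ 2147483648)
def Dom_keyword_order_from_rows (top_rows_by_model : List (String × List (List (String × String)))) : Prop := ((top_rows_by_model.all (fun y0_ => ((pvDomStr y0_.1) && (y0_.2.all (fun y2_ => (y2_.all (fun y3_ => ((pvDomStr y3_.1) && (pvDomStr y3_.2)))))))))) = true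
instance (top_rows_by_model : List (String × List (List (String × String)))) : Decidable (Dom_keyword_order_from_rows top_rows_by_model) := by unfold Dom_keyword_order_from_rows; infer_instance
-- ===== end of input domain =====

-- B replaces A's scan-while-building dedup by a flatten pass plus a head-and-filter sieve; objective: alternative (no speed claim).

-- ===== PORT A =====
-- A: nested loop, appending a non-empty keyword only if not already collected.
def keyword_order_from_rows (top_rows_by_model : List (String × List (List (String × String)))) : List String :=
  top_rows_by_model.foldl (fun keywords mr =>
    mr.2.foldl (fun keywords row =>
      -- keyword = str(row.get("keyword", "") or ""); row values are strings, so this is row.get("keyword", "")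
      let keyword := (PySem.Dict.mk row).getD "keyword" ""
      if keyword ≠ "" ∧ keyword ∉ keywords then keywords ++ [keyword] else keywords)
      keywords)
    []

-- ===== PORT B =====
-- B's while loop: emit the head, filter its duplicates out of the worklist, repeat.
def pvSieve : List String → List String
  | [] => []
  | head :: rest => head :: pvSieve (rest.filter (fun k => k ≠ head))
termination_by l => l.length
decreasing_by
  simpa using le_trans (List.length_filter_le _ _) (Nat.le_of_eq rest.length_attach)

-- B: flatten all keywords, drop empties, then sieve.
def keyword_order_from_rows_alt (top_rows_by_model : List (String × List (List (String × String)))) : List String :=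
  let flat : List String :=
    top_rows_by_model.flatMap (fun mr =>
      mr.2.map (fun row => (PySem.Dict.mk row).getD "keyword" ""))
  pvSieve (flat.filter (fun kw => kw ≠ ""))

-- ===== PRECONDITION & SPEC =====
def Spec_keyword_order_from_rows (top_rows_by_model : List (String × List (List (String × String)))) (out : List String) : Prop := out = keyword_order_from_rows_alt top_rows_by_model
instance (top_rows_by_model : List (String × List (List (String × String)))) (out : List String) : Decidable (Spec_keyword_order_from_rows top_rows_by_model out) := by unfold Spec_keyword_order_from_rows; infer_instance

-- ===== CLAIM (what is proved, stated in full; the proofs are below) =====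
def Claim_equal_keyword_order_from_rows : Prop := ∀ (top_rows_by_model : List (String × List (List (String × String)))), Dom_keyword_order_from_rows top_rows_by_model → Spec_keyword_order_from_rows top_rows_by_model (keyword_order_from_rows top_rows_by_model)

-- ===== LEMMAS AND PROOFS =====

-- A's inner loop over one model's rows = Set.update with that model's non-empty keywords.
theorem pv_inner (rows : List (List (String × String))) (acc : List String) :
    rows.foldl (fun keywords row =>
      let keyword := (PySem.Dict.mk row).getD "keyword" ""
      if keyword ≠ "" ∧ keyword ∉ keywords then keywords ++ [keyword] else keywords) acc
    = PySem.Set.update acc ((rows.map (fun row => (PySem.Dict.mk row).getD "keyword" "")).filter (fun kw => kw ≠ "")) := by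
  induction rows generalizing acc with
  | nil => simp [PySem.Set.update]
  | cons r rs ih =>
    simp only [List.foldl_cons, List.map_cons, List.filter_cons]
    by_cases h : (PySem.Dict.mk r).getD "keyword" "" = ""
    · simp [h, ih]
    · simp only [h, ne_eq, not_false_iff, true_and, decide_true, reduceIte]
      rw [ih, PySem.Set.update_cons, PySem.Set.add_eq_ite]
      by_cases hm : (PySem.Dict.mk r).getD "keyword" "" ∈ acc
      · simp [hm]
      · simp [hm]

-- A's outer loop = Set.update with all non-empty keywords, flattened.
theorem pv_outer (t : List (String × List (List (String × String)))) (acc : List String) :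
    t.foldl (fun keywords mr =>
      mr.2.foldl (fun keywords row =>
        let keyword := (PySem.Dict.mk row).getD "keyword" ""
        if keyword ≠ "" ∧ keyword ∉ keywords then keywords ++ [keyword] else keywords) keywords) acc
    = PySem.Set.update acc ((t.flatMap (fun mr =>
        mr.2.map (fun row => (PySem.Dict.mk row).getD "keyword" ""))).filter (fun kw => kw ≠ "")) := by
  induction t generalizing acc with
  | nil => simp [PySem.Set.update]
  | cons m ms ih =>
    simp only [List.foldl_cons, List.flatMap_cons, List.filter_append]
    rw [pv_inner, ih, PySem.Set.update_append]

@[simp] theorem pvSieve_nil : pvSieve [] = [] := by simp [pvSieve]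

@[simp] theorem pvSieve_cons (h : String) (t : List String) :
    pvSieve (h :: t) = h :: pvSieve (t.filter (fun k => k ≠ h)) := by simp [pvSieve]

-- Set.update = append the sieve of the not-yet-seen elements.
theorem pv_update_eq_sieve (l acc : List String) :
    PySem.Set.update acc l = acc ++ pvSieve (l.filter (fun k => k ∉ acc)) := by
  induction l generalizing acc with
  | nil => simp [PySem.Set.update]
  | cons x xs ih =>
    rw [PySem.Set.update_cons, PySem.Set.add_eq_ite]
    by_cases hx : x ∈ acc
    · simp only [List.filter_cons, hx, not_true_eq_false, decide_false, reduceIte]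
      exact ih acc
    · simp only [List.filter_cons, hx, not_false_eq_true, decide_true, reduceIte, pvSieve_cons]
      rw [ih (acc ++ [x]), List.append_assoc, List.cons_append, List.nil_append,
        List.filter_filter]
      have heq : List.filter (fun k => decide (k ∉ acc ++ [x])) xs
          = List.filter (fun k => decide (k ≠ x) && decide (k ∉ acc)) xs := by
        apply List.filter_congr
        intro k _
        by_cases hk : k = x <;> by_cases hka : k ∈ acc <;> simp [hk, hka]
      rw [heq]

-- ===== VERDICT (by name: the statement is the Claim_ definition above) =====
theorem keyword_order_from_rows_spec : Claim_equal_keyword_order_from_rows := by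
  intro t _
  unfold Spec_keyword_order_from_rows keyword_order_from_rows keyword_order_from_rows_alt
  rw [pv_outer, pv_update_eq_sieve]
  simp
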